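-- pv_equiv track=rewrite | github.com/ravindrakroolo/KR-1-development | KR-1-development/pipeline/processors/dropbox_processor.py | _should_download_content
-- ===== SOURCE A (Python) =====
-- def _should_download_content(file_name: str) -> bool:
--     """Determine if file content should be downloaded"""
--     if not file_name:
--         return False
--
--     file_name_lower = file_name.lower()
--
--     # Text files
--     text_extensions = ['.txt', '.md', '.csv', '.json', '.xml', '.yml', '.yaml']
--     if any(file_name_lower.endswith(ext) for ext in text_extensions):
--         return True
--
--     # Small document files (with size limit checking in actual download)
--     doc_extensions = ['.doc', '.docx', '.pdf']
--     if any(file_name_lower.endswith(ext) for ext in doc_extensions):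
--         return True
--
--     return False
-- ===== SOURCE B (Python) =====
-- def _should_download_content(file_name: str) -> bool:
--     """Determine if file content should be downloaded"""
--     if not file_name:
--         return False
--     low = file_name.lower()
--     if '.' not in low:
--         return False
--     ext = '.' + low.rsplit('.', 1)[-1]
--     return ext in {'.txt', '.md', '.csv', '.json', '.xml', '.yml', '.yaml',
--                    '.doc', '.docx', '.pdf'}
-- ===== Notes on version B (the rewrite author's own statement) =====
-- stated objective: simpler
-- what changed: B parses the extension once (substring after the last dot via rsplit) and does a single set-membership test, replacing A's two any-endswith loops over extension lists.
import Mathlib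
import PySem

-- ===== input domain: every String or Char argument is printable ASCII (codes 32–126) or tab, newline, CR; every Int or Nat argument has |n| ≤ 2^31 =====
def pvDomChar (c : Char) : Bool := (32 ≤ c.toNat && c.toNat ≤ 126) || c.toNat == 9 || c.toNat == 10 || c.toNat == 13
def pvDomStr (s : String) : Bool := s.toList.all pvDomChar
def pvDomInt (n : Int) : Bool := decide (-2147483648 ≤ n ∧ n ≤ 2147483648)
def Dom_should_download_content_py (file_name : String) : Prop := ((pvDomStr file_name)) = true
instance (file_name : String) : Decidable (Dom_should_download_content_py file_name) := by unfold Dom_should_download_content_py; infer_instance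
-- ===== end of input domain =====

-- B parses the extension once (text after the last dot) and does one membership test,
-- instead of A's two any-endswith loops over extension lists (objective: simpler).

-- ===== PORT A =====
def should_download_content_py (file_name : String) : Bool :=
  if file_name = "" then false
  else
    let file_name_lower := PySem.Str.lower file_name
    if [".txt", ".md", ".csv", ".json", ".xml", ".yml", ".yaml"].any
        (fun ext => PySem.Str.endswith file_name_lower ext) then true
    else if [".doc", ".docx", ".pdf"].any
        (fun ext => PySem.Str.endswith file_name_lower ext) then true
    else false

-- ===== PORT B =====
def should_download_content_py_alt (file_name : String) : Bool :=
  if file_name = "" then false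
  else
    let low := (PySem.Str.lower file_name).toList
    if low.contains '.' then
      -- low.rsplit('.', 1)[-1] = the part after the last '.'
      let ext : List Char := '.' :: (low.reverse.takeWhile (fun c => c != '.')).reverse
      [".txt", ".md", ".csv", ".json", ".xml", ".yml", ".yaml", ".doc", ".docx", ".pdf"].any
        (fun e => ext == e.toList)
    else false

-- ===== PRECONDITION & SPEC =====
def Spec_should_download_content_py (file_name : String) (out : Bool) : Prop := out = should_download_content_py_alt file_name
instance (file_name : String) (out : Bool) : Decidable (Spec_should_download_content_py file_name out) := by unfold Spec_should_download_content_py; infer_instance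

-- ===== CLAIM (what is proved, stated in full; the proofs are below) =====
def Claim_equal_should_download_content_py : Prop := ∀ (file_name : String), Dom_should_download_content_py file_name → Spec_should_download_content_py file_name (should_download_content_py file_name)

-- ===== LEMMAS AND PROOFS =====

-- (er ++ ['.']) is a prefix of r  iff  r contains a dot and its dot-free head is er.
lemma pref_iff (er r : List Char) (he : '.' ∉ er) :
    (er ++ ['.']) <+: r ↔ ('.' ∈ r ∧ r.takeWhile (fun c => c != '.') = er) := by
  induction r generalizing er with
  | nil =>
      simp only [List.prefix_nil, List.not_mem_nil, false_and, iff_false]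
      intro h
      exact absurd (List.append_eq_nil_iff.mp h).2 (by simp)
  | cons c r ih =>
      cases er with
      | nil =>
          by_cases hc : c = '.'
          · subst hc
            simp
          · simp [List.cons_prefix_cons, hc, Ne.symm hc]
      | cons a er' =>
          have ha : a ≠ '.' := fun h => he (by simp [h])
          have he' : '.' ∉ er' := fun h => he (by simp [h])
          rw [List.cons_append, List.cons_prefix_cons]
          by_cases hc : c = '.'
          · subst hc
            rw [List.takeWhile_cons, if_neg (by decide)]
            simp [ha]
          · by_cases hac : a = c
            · subst hac
              rw [List.takeWhile_cons, if_pos (by simpa [bne_iff_ne] using ha)]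
              rw [ih er' he']
              constructor
              · rintro ⟨-, h1, h2⟩
                exact ⟨List.mem_cons_of_mem _ h1, by rw [h2]⟩
              · rintro ⟨h1, h2⟩
                injection h2 with _ h2'
                refine ⟨rfl, ?_, h2'⟩
                rcases List.mem_cons.mp h1 with h | h
                · exact absurd h.symm ha
                · exact h
            · constructor
              · rintro ⟨h, -⟩
                exact absurd h hac
              · rintro ⟨-, h2⟩
                exfalso
                by_cases hb : (c != '.') = true
                · rw [List.takeWhile_cons, if_pos hb] at h2
                  injection h2 with h h'
                  exact hac h.symm
                · rw [List.takeWhile_cons, if_neg hb] at h2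
                  simp at h2

-- endswith with a '.'-headed dot-free extension, expressed through the last-dot split.
lemma ends_eq (cs ee : List Char) (he : '.' ∉ ee) :
    PySem.Chars.endswith cs ('.' :: ee) =
      (cs.contains '.' && ((cs.reverse.takeWhile (fun c => c != '.')).reverse == ee)) := by
  rw [Bool.eq_iff_iff, PySem.Chars.endswith_iff, Bool.and_eq_true, beq_iff_eq]
  rw [show ('.' :: ee) <:+ cs ↔ (ee.reverse ++ ['.']) <+: cs.reverse from by
    rw [← List.reverse_prefix]; simp]
  rw [pref_iff ee.reverse cs.reverse (by simpa using he)]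
  constructor
  · rintro ⟨h1, h2⟩
    refine ⟨?_, ?_⟩
    · simpa [List.contains_iff_mem] using List.mem_reverse.mp h1
    · rw [h2]; simp
  · rintro ⟨h1, h2⟩
    refine ⟨?_, ?_⟩
    · simpa using (List.contains_iff_mem.mp h1 : ('.' : Char) ∈ cs)
    · rw [← h2]; simp

-- ===== VERDICT (by name: the statement is the Claim_ definition above) =====
theorem should_download_content_py_spec : Claim_equal_should_download_content_py := by
  intro file_name _
  unfold Spec_should_download_content_py should_download_content_py should_download_content_py_alt
  by_cases hn : file_name = ""
  · simp [hn]
  · simp only [if_neg hn]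
    set cs := (PySem.Str.lower file_name).toList with hcs
    have hends : ∀ e : String, PySem.Str.endswith (PySem.Str.lower file_name) e
        = PySem.Chars.endswith cs e.toList := by
      intro e; simp [PySem.Str.endswith, hcs]
    simp only [List.any_cons, List.any_nil, hends]
    simp only [show (".txt" : String).toList = ['.','t','x','t'] from rfl,
      show (".md" : String).toList = ['.','m','d'] from rfl,
      show (".csv" : String).toList = ['.','c','s','v'] from rfl,
      show (".json" : String).toList = ['.','j','s','o','n'] from rfl,
      show (".xml" : String).toList = ['.','x','m','l'] from rfl,
      show (".yml" : String).toList = ['.','y','m','l'] from rfl,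
      show (".yaml" : String).toList = ['.','y','a','m','l'] from rfl,
      show (".doc" : String).toList = ['.','d','o','c'] from rfl,
      show (".docx" : String).toList = ['.','d','o','c','x'] from rfl,
      show (".pdf" : String).toList = ['.','p','d','f'] from rfl]
    rw [ends_eq cs ['t','x','t'] (by decide), ends_eq cs ['m','d'] (by decide),
        ends_eq cs ['c','s','v'] (by decide), ends_eq cs ['j','s','o','n'] (by decide),
        ends_eq cs ['x','m','l'] (by decide), ends_eq cs ['y','m','l'] (by decide),
        ends_eq cs ['y','a','m','l'] (by decide), ends_eq cs ['d','o','c'] (by decide),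
        ends_eq cs ['d','o','c','x'] (by decide), ends_eq cs ['p','d','f'] (by decide)]
    have hite : ∀ x y : Bool, (if x = true then true else if y = true then true else false) = (x || y) := by decide
    have hcons : ∀ (t e : List Char), (('.' :: t) == ('.' :: e)) = (t == e) := by
      intro t e
      rw [Bool.eq_iff_iff]
      simp
    rw [hite]
    simp only [hcons]
    by_cases hc : cs.contains '.' = true
    · simp only [hc, if_true, Bool.true_and, Bool.or_false, Bool.or_assoc]
    · have hd : ('.' : Char) ∉ cs := fun h => hc (List.contains_iff_mem.mpr h)
      simp [hd]
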